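-- pv_equiv track=rewrite | github.com/LocalSymmetry/lofn | lofn/lofjson/repair.py | _remove_json_comments
-- ===== SOURCE A (Python) =====
-- from typing import Any, Dict, List, Optional, Sequence, Tuple
--
-- def _remove_json_comments(json_like: str) -> str:
--     out: List[str] = []
--     i = 0
--     n = len(json_like)
--     in_string = False
--     quote_char: Optional[str] = None
--     escape = False
--     while i < n:
--         ch = json_like[i]
--         nxt = json_like[i+1] if i+1 < n else ''
--         if escape:
--             out.append(ch)
--             escape = False
--             i += 1
--             continue
--         if ch == "\\" and in_string:
--             out.append(ch)
--             escape = True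
--             i += 1
--             continue
--         if ch in ('"', "'") and not in_string:
--             in_string = True
--             quote_char = ch
--             out.append(ch)
--             i += 1
--             continue
--         if in_string and ch == quote_char:
--             in_string = False
--             quote_char = None
--             out.append(ch)
--             i += 1
--             continue
--         if not in_string and ch == '/' and nxt == '/':
--             i += 2
--             while i < n and json_like[i] not in ('\n', '\r'):
--                 i += 1
--             continue
--         if not in_string and ch == '/' and nxt == '*':
--             i += 2
--             while i+1 < n and not (json_like[i] == '*' and json_like[i+1] == '/'):
--                 i += 1
--             i += 2
--             continue
--         out.append(ch)
--         i += 1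
--     return ''.join(out)
-- ===== SOURCE B (Python) =====
-- from typing import List
--
-- def _remove_json_comments(json_like: str) -> str:
--     # Token-chunk scanner: consume whole string literals (as slices) and whole
--     # comments (via str.find) instead of tracking per-char state flags.
--     s = json_like
--     n = len(s)
--     out: List[str] = []
--     i = 0
--     while i < n:
--         ch = s[i]
--         if ch == '"' or ch == "'":
--             j = i + 1
--             while j < n:
--                 c = s[j]
--                 if c == '\\':
--                     j += 2
--                 elif c == ch:
--                     j += 1
--                     break
--                 else:
--                     j += 1
--             out.append(s[i:j])
--             i = j
--         elif s.startswith('//', i):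
--             nl = s.find('\n', i + 2)
--             cr = s.find('\r', i + 2)
--             ends = [e for e in (nl, cr) if e != -1]
--             i = min(ends) if ends else n
--         elif s.startswith('/*', i):
--             e = s.find('*/', i + 2)
--             i = n if e == -1 else e + 2
--         else:
--             out.append(ch)
--             i += 1
--     return ''.join(out)
-- ===== Notes on version B (the rewrite author's own statement) =====
-- stated objective: alternative
-- what changed: Replaces A's per-character state machine (in_string/quote_char/escape flags threaded through one index loop) with a token-chunk scanner that consumes whole string literals as slices and whole comments via str.find jumps, keeping no cross-iteration state.
import Mathlib
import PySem

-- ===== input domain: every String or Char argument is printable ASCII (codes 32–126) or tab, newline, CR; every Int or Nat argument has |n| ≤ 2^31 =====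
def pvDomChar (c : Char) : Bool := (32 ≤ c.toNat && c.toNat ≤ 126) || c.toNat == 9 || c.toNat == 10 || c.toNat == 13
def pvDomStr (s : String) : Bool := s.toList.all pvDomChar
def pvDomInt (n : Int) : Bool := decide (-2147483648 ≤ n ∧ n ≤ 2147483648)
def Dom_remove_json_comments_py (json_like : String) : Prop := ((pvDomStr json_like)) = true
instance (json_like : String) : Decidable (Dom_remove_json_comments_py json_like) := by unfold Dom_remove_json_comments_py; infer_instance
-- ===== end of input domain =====

-- B replaces A's per-character state machine (in_string/quote_char/escape flags) by a
-- token-chunk scanner that consumes whole string literals and whole comments at once;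
-- objective: simpler/alternative, same O(n) cost.

-- ===== PORT A =====
-- inner `while i < n and json_like[i] not in ('\n','\r')` loop of A
def skipLineA : List Char → List Char
  | [] => []
  | c :: r => if c = '\n' ∨ c = '\r' then c :: r else skipLineA r

-- inner `while i+1 < n and not (json_like[i]=='*' and json_like[i+1]=='/')` loop, then `i += 2`
def skipBlockA : List Char → List Char
  | [] => []
  | [_] => []
  | c1 :: c2 :: r => if c1 = '*' ∧ c2 = '/' then r else skipBlockA (c2 :: r)

theorem skipLineA_len (l : List Char) : (skipLineA l).length ≤ l.length := by
  induction l with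
  | nil => simp [skipLineA]
  | cons c r ih =>
    simp only [skipLineA]
    split
    · simp
    · simp; omega

theorem skipBlockA_len (l : List Char) : (skipBlockA l).length ≤ l.length := by
  induction l using skipBlockA.induct
  all_goals simp_all [skipBlockA]
  all_goals first | omega | (rw [if_neg (by tauto)]; omega)

-- A's main while-loop, recursion over the remaining suffix with A's exact state
def goA : List Char → Bool → Option Char → Bool → List Char
  | [], _, _, _ => []
  | ch :: rest, instr, q, esc =>
    if esc = true then ch :: goA rest instr q false
    else if ch = '\\' ∧ instr = true then ch :: goA rest instr q true
    else if (ch = '"' ∨ ch = '\'') ∧ instr = false then ch :: goA rest true (some ch) esc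
    else if instr = true ∧ q = some ch then ch :: goA rest false none esc
    else if instr = false ∧ ch = '/' ∧ rest.head? = some '/' then goA (skipLineA rest.tail) instr q esc
    else if instr = false ∧ ch = '/' ∧ rest.head? = some '*' then goA (skipBlockA rest.tail) instr q esc
    else ch :: goA rest instr q esc
termination_by l _ _ _ => l.length
decreasing_by
  · simp
  · simp
  · simp
  · simp
  · have h1 := skipLineA_len rest.tail
    have h2 : rest.tail.length ≤ rest.length := by cases rest <;> simp
    simp; omega
  · have h1 := skipBlockA_len rest.tail
    have h2 : rest.tail.length ≤ rest.length := by cases rest <;> simp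
    simp; omega
  · simp

def remove_json_comments_py (json_like : String) : String :=
  String.ofList (goA json_like.toList false none false)

-- ===== PORT B =====
-- B's inner string-literal loop: returns (consumed token after the opening quote, rest)
def takeStrB (q : Char) : List Char → List Char × List Char
  | [] => ([], [])
  | c :: r =>
    if c = '\\' then
      match r with
      | [] => ([c], [])
      | d :: r' => let p := takeStrB q r'; (c :: d :: p.1, p.2)
    else if c = q then ([c], r)
    else let p := takeStrB q r; (c :: p.1, p.2)

-- B's line-comment skip: jump to the first '\n' or '\r' (min of the two finds), or EOF
def dropLineB : List Char → List Char
  | [] => []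
  | c :: r => if c = '\n' ∨ c = '\r' then c :: r else dropLineB r

-- B's block-comment skip: jump past the first "*/" (find), or EOF
def dropBlockB : List Char → List Char
  | [] => []
  | [_] => []
  | c1 :: c2 :: r => if c1 = '*' ∧ c2 = '/' then r else dropBlockB (c2 :: r)

theorem takeStrB_len (q : Char) (l : List Char) : (takeStrB q l).2.length ≤ l.length := by
  induction l using takeStrB.induct q
  all_goals (try rw [takeStrB.eq_def])
  all_goals simp_all
  all_goals omega

theorem dropLineB_len (l : List Char) : (dropLineB l).length ≤ l.length := by
  induction l with
  | nil => simp [dropLineB]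
  | cons c r ih =>
    simp only [dropLineB]
    split
    · simp
    · simp; omega

theorem dropBlockB_len (l : List Char) : (dropBlockB l).length ≤ l.length := by
  induction l using dropBlockB.induct
  all_goals simp_all [dropBlockB]
  all_goals first | omega | (rw [if_neg (by tauto)]; omega)

-- B's main while-loop: token-at-a-time
def goB : List Char → List Char
  | [] => []
  | ch :: rest =>
    if ch = '"' ∨ ch = '\'' then
      let p := takeStrB ch rest
      ch :: (p.1 ++ goB p.2)
    else if ch = '/' ∧ rest.head? = some '/' then goB (dropLineB rest.tail)
    else if ch = '/' ∧ rest.head? = some '*' then goB (dropBlockB rest.tail)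
    else ch :: goB rest
termination_by l => l.length
decreasing_by
  · have h1 := takeStrB_len ch rest
    simp; omega
  · have h1 := dropLineB_len rest.tail
    have h2 : rest.tail.length ≤ rest.length := by cases rest <;> simp
    simp; omega
  · have h1 := dropBlockB_len rest.tail
    have h2 : rest.tail.length ≤ rest.length := by cases rest <;> simp
    simp; omega
  · simp

def remove_json_comments_py_alt (json_like : String) : String :=
  String.ofList (goB json_like.toList)

-- ===== PRECONDITION & SPEC =====
def Spec_remove_json_comments_py (json_like : String) (out : String) : Prop := out = remove_json_comments_py_alt json_like
instance (json_like : String) (out : String) : Decidable (Spec_remove_json_comments_py json_like out) := by unfold Spec_remove_json_comments_py; infer_instance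

-- ===== CLAIM (what is proved, stated in full; the proofs are below) =====
def Claim_equal_remove_json_comments_py : Prop := ∀ (json_like : String), Dom_remove_json_comments_py json_like → Spec_remove_json_comments_py json_like (remove_json_comments_py json_like)

-- ===== LEMMAS AND PROOFS =====
theorem takeStrB_cons_bs_nil (q : Char) : takeStrB q ['\\'] = (['\\'], []) := by
  rw [takeStrB.eq_def]; simp

theorem takeStrB_cons_bs (q d : Char) (r' : List Char) :
    takeStrB q ('\\' :: d :: r') = ('\\' :: d :: (takeStrB q r').1, (takeStrB q r').2) := by
  rw [takeStrB.eq_def]; simp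

theorem takeStrB_cons_close (q : Char) (r : List Char) (h : ¬ q = '\\') :
    takeStrB q (q :: r) = ([q], r) := by
  rw [takeStrB.eq_def]; simp [h]

theorem takeStrB_cons_other (q c : Char) (r : List Char) (h1 : ¬ c = '\\') (h2 : ¬ c = q) :
    takeStrB q (c :: r) = (c :: (takeStrB q r).1, (takeStrB q r).2) := by
  rw [takeStrB.eq_def]; simp [h1, h2]

theorem skipLineA_eq (l : List Char) : skipLineA l = dropLineB l := by
  induction l with
  | nil => rfl
  | cons c r ih => simp only [skipLineA, dropLineB]; split <;> simp [ih]

theorem skipBlockA_eq (l : List Char) : skipBlockA l = dropBlockB l := by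
  induction l using skipBlockA.induct
  all_goals simp_all [skipBlockA, dropBlockB]

theorem goA_goB (n : Nat) : ∀ (l : List Char), l.length ≤ n →
    (goA l false none false = goB l) ∧
    (∀ q : Char, goA l true (some q) false =
      (takeStrB q l).1 ++ goB (takeStrB q l).2) := by
  induction n with
  | zero =>
    intro l hl
    have hnil : l = [] := List.length_eq_zero_iff.mp (Nat.le_zero.mp hl)
    subst hnil
    simp [goA, goB, takeStrB]
  | succ n ih =>
    intro l hl
    cases l with
    | nil => simp [goA, goB, takeStrB]
    | cons ch rest =>
      have hrest : rest.length ≤ n := by simp at hl; omega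
      have htail : rest.tail.length ≤ rest.length := by cases rest <;> simp
      constructor
      · -- state (in_string = false, quote_char = none, escape = false)
        by_cases hq : ch = '"' ∨ ch = '\''
        · have h2 := (ih rest hrest).2 ch
          simp only [goA, goB]
          simp [hq, h2]
        · by_cases hsl : ch = '/' ∧ rest.head? = some '/'
          · have h1 := (ih (dropLineB rest.tail)
              (le_trans (dropLineB_len rest.tail) (le_trans htail hrest))).1
            simp only [goA, goB]
            simp [hsl, skipLineA_eq, h1]
          · by_cases hbl : ch = '/' ∧ rest.head? = some '*'
            · have h1 := (ih (dropBlockB rest.tail)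
                (le_trans (dropBlockB_len rest.tail) (le_trans htail hrest))).1
              simp only [goA, goB]
              simp [hbl, skipBlockA_eq, h1]
            · have h1 := (ih rest hrest).1
              simp only [goA, goB]
              simp [hq, hsl, hbl, h1]
      · -- state (in_string = true, quote_char = some q, escape = false)
        intro q
        by_cases hbs : ch = '\\'
        · subst hbs
          cases rest with
          | nil => simp [goA, takeStrB_cons_bs_nil, goB]
          | cons d r' =>
            have hr' : r'.length ≤ n := by simp at hl; omega
            have h2 := (ih r' hr').2 q
            simp only [goA, takeStrB_cons_bs]
            simp [h2]
        · by_cases hc : ch = q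
          · subst hc
            have h1 := (ih rest hrest).1
            simp only [goA, takeStrB_cons_close _ _ hbs]
            simp [hbs, h1]
          · have hq' : ¬ (some q = some ch) := by simpa using fun h => hc h.symm
            have h2 := (ih rest hrest).2 q
            simp only [goA, takeStrB_cons_other _ _ _ hbs hc]
            simp [hbs, hq', h2]

-- ===== VERDICT (by name: the statement is the Claim_ definition above) =====
theorem remove_json_comments_py_spec : Claim_equal_remove_json_comments_py := by
  intro s _
  unfold Spec_remove_json_comments_py remove_json_comments_py remove_json_comments_py_alt
  exact congrArg String.ofList (goA_goB s.toList.length s.toList le_rfl).1
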